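-- pv_equiv track=rewrite | github.com/thehalleyyoung/halley-labs | causal-robustness-radii/proposals/proposal_00/implementation/causalcert/solver/symmetry.py | orbits
-- ===== SOURCE A (Python) =====
-- from collections import defaultdict, deque
-- from typing import (
--     Dict,
--     FrozenSet,
--     List,
--     Optional,
--     Sequence,
--     Set,
--     Tuple,
-- )
--
-- def orbits(group: List[List[int]], n: int) -> List[FrozenSet[int]]:
--     """Compute the orbits of the automorphism group on nodes.
--
--     Two nodes are in the same orbit if some automorphism maps one to the other.
--     """
--     parent = list(range(n))
--
--     def _find(x: int) -> int:
--         while parent[x] != x: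
--             parent[x] = parent[parent[x]]
--             x = parent[x]
--         return x
--
--     def _union(x: int, y: int) -> None:
--         rx, ry = _find(x), _find(y)
--         if rx != ry:
--             parent[rx] = ry
--
--     for perm in group:
--         for i in range(n):
--             _union(i, perm[i])
--
--     orbit_map: Dict[int, Set[int]] = defaultdict(set)
--     for i in range(n):
--         orbit_map[_find(i)].add(i)
--     return [frozenset(s) for s in orbit_map.values()]
-- ===== SOURCE B (Python) =====
-- def orbits(group, n):
--     """Compute the orbits of the automorphism group on nodes.
--
--     Label-rewriting components: keep one component label per node; for each
--     mapping i -> perm[i] whose endpoints carry different labels, rewrite one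
--     label into the other everywhere; finally group nodes by their label.
--     """
--     comp = list(range(n))
--     for perm in group:
--         for i in range(n):
--             a, b = comp[i], comp[perm[i]]
--             if a != b:
--                 comp = [b if c == a else c for c in comp]
--     out = {}
--     for i in range(n):
--         out.setdefault(comp[i], []).append(i)
--     return [frozenset(g) for g in out.values()]
-- ===== Notes on version B (the rewrite author's own statement) =====
-- stated objective: alternative
-- what changed: Replaces the path-compressing union-find (mutable parent forest with while-loop find) by direct label rewriting: one component label per node, merged by rewriting one label into the other, then a single grouping pass; no trees, no find loop.
import Mathlib
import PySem

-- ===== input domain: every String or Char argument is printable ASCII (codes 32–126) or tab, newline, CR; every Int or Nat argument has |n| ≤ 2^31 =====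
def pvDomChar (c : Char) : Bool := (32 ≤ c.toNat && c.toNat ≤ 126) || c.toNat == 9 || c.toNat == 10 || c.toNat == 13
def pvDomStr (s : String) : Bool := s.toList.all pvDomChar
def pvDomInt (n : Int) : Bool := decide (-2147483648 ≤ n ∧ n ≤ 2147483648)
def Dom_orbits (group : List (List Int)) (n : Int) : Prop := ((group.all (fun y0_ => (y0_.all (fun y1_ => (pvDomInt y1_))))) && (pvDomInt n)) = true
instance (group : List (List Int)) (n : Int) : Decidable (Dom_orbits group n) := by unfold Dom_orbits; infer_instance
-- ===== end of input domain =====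

-- B replaces A's path-compressing union-find by label rewriting (one component label per
-- node, merged by rewriting) plus one grouping pass: an alternative algorithm, same cost class.
-- A mutates only its local `parent` list, so return-value equivalence is the whole story.


-- ===== PORT A =====
-- `_find`'s while loop, with fuel (`parent.length + 1` at each call; within Pre_orbits the
-- loop provably exits before the fuel runs out).  Returns the updated parent list and x.
def pvFind (parent : List Int) (x : Int) : Nat → List Int × Int
  | 0 => (parent, x)
  | fuel+1 =>
    if PySem.List.pyGetD parent x 0 ≠ x then
      let g := PySem.List.pyGetD parent (PySem.List.pyGetD parent x 0) 0
      pvFind (PySem.List.pySetD parent x g) g fuel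
    else (parent, x)

-- `_union`
def pvUnion (parent : List Int) (x y : Int) : List Int :=
  let r1 := pvFind parent x (parent.length + 1)
  let r2 := pvFind r1.1 y (r1.1.length + 1)
  if r1.2 ≠ r2.2 then PySem.List.pySetD r2.1 r1.2 r2.2 else r2.1

-- the inner `for i in range(n): _union(i, perm[i])` loop
def pvUnionRound (n : Int) (par perm : List Int) : List Int :=
  (PySem.List.pyRange 0 n 1).foldl (fun par i => pvUnion par i (PySem.List.pyGetD perm i 0)) par

-- the final `for i in range(n): orbit_map[_find(i)].add(i)` loop (threads the mutated parent)
def pvCollect (n : Int) (st : List Int × PySem.Dict Int (PySem.Set Int)) :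
    List Int × PySem.Dict Int (PySem.Set Int) :=
  (PySem.List.pyRange 0 n 1).foldl (fun st i =>
    let fr := pvFind st.1 i (st.1.length + 1)
    (fr.1, st.2.insert fr.2 (PySem.Set.add (st.2.getD fr.2 PySem.Set.empty) i))) st

def orbits (group : List (List Int)) (n : Int) : List (List Int) :=
  let parent := group.foldl (pvUnionRound n) (PySem.List.pyRange 0 n 1)
  (pvCollect n (parent, PySem.Dict.empty)).2.values

-- ===== PORT B =====
-- `comp = [b if c == a else c for c in comp]`
def pvRelabel (comp : List Int) (a b : Int) : List Int := comp.map (fun c => if c = a then b else c)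

-- one pass `for i in range(n)` of B's merging loop
def pvMergeRound (n : Int) (comp perm : List Int) : List Int :=
  (PySem.List.pyRange 0 n 1).foldl (fun comp i =>
    let a := PySem.List.pyGetD comp i 0
    let b := PySem.List.pyGetD comp (PySem.List.pyGetD perm i 0) 0
    if a ≠ b then pvRelabel comp a b else comp) comp

def orbits_alt (group : List (List Int)) (n : Int) : List (List Int) :=
  let comp := group.foldl (pvMergeRound n) (PySem.List.pyRange 0 n 1)
  let d := (PySem.List.pyRange 0 n 1).foldl (fun d i =>
      let k := PySem.List.pyGetD comp i 0
      d.insert k (d.getD k [] ++ [i])) PySem.Dict.empty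
  d.values.map PySem.Set.ofList

-- ===== PRECONDITION & SPEC =====
-- Exactly the inputs on which the Python A returns normally: for every permutation, the
-- first n entries exist (no IndexError on perm[i]) and each is a valid (possibly negative)
-- Python index into the length-n parent list (no IndexError inside _find/_union).
def Pre_orbits (group : List (List Int)) (n : Int) : Prop :=
  ∀ perm ∈ group, n ≤ (perm.length : Int) ∧ ∀ p ∈ perm.take n.toNat, -n ≤ p ∧ p < n
instance (group : List (List Int)) (n : Int) : Decidable (Pre_orbits group n) := by
  unfold Pre_orbits; infer_instance

def pvWitness_orbits : List (List Int) × Int := ([[1, 0, 2], [0, 2, 1]], 3)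

def Spec_orbits (group : List (List Int)) (n : Int) (out : List (List Int)) : Prop := out = orbits_alt group n
instance (group : List (List Int)) (n : Int) (out : List (List Int)) : Decidable (Spec_orbits group n out) := by unfold Spec_orbits; infer_instance

-- ===== CLAIM (what is proved, stated in full; the proofs are below) =====
def Claim_equal_orbits : Prop := ∀ (group : List (List Int)) (n : Int), Dom_orbits group n → Pre_orbits group n → Spec_orbits group n (orbits group n)

-- ===== LEMMAS AND PROOFS =====

-- ---------- the parent forest, as a Nat → Nat step function ----------

/-- the parent function on normalized indices -/
def pfN (P : List Int) (k : Nat) : Nat := (P.getD k 0).toNat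

/-- `_find`'s chase-to-the-root, fuelled, without compression (proof-side model) -/
def rIter (P : List Int) : Nat → Nat → Nat
  | k, 0 => k
  | k, fuel+1 => if pfN P k = k then k else rIter P (pfN P k) fuel

/-- canonical representative of `k` in the forest `P` -/
def rootP (P : List Int) (k : Nat) : Nat := rIter P k P.length

/-- well-formed parent list: entries in `[0, len)` and no cycles (a rank certificate) -/
def GoodP (P : List Int) : Prop :=
  (∀ k, k < P.length → 0 ≤ P.getD k 0 ∧ P.getD k 0 < (P.length : Int)) ∧
  ∃ rank : Nat → Nat, ∀ k, k < P.length → pfN P k ≠ k → rank (pfN P k) < rank k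

/-- the chain from `k` reaches a fixpoint after `j` steps -/
def ReachP (P : List Int) (k j : Nat) : Prop := pfN P ((pfN P)^[j] k) = (pfN P)^[j] k

/-- normalized (Python, possibly negative) index -/
def nrm (len : Nat) (x : Int) : Nat := if 0 ≤ x then x.toNat else len - (-x).toNat

lemma nrm_lt (len : Nat) (x : Int) (h1 : -(len : Int) ≤ x) (h2 : x < (len : Int)) :
    nrm len x < len := by
  unfold nrm; split_ifs with h <;> omega

lemma pyGetD_nrm (P : List Int) (x : Int) (d : Int) (h1 : -(P.length : Int) ≤ x)
    (h2 : x < (P.length : Int)) :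
    PySem.List.pyGetD P x d = P.getD (nrm P.length x) d := by
  unfold PySem.List.pyGetD PySem.List.pyGet? PySem.List.pyIdx? nrm
  split_ifs with h h' h'' <;> simp_all [List.getD_eq_getElem?_getD] <;> try omega

lemma pySetD_nrm (P : List Int) (x v : Int) (h1 : -(P.length : Int) ≤ x)
    (h2 : x < (P.length : Int)) :
    PySem.List.pySetD P x v = P.set (nrm P.length x) v := by
  unfold PySem.List.pySetD PySem.List.pySet? PySem.List.pyIdx? nrm
  split_ifs with h h' h'' <;> simp_all <;> try omega

lemma getD_eq_cast_pf (P : List Int) (hG : GoodP P) (k : Nat) (hk : k < P.length) :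
    P.getD k 0 = ((pfN P k : Nat) : Int) := by
  have h := (hG.1 k hk).1
  unfold pfN; omega

lemma pf_lt (P : List Int) (hG : GoodP P) (k : Nat) (hk : k < P.length) :
    pfN P k < P.length := by
  have h := hG.1 k hk
  unfold pfN; omega

lemma chain_lt (P : List Int) (hG : GoodP P) (k : Nat) (hk : k < P.length) (t : Nat) :
    (pfN P)^[t] k < P.length := by
  induction t generalizing k with
  | zero => simpa
  | succ t ih =>
    rw [Function.iterate_succ_apply]
    exact ih _ (pf_lt P hG k hk)

lemma iterate_fix_stable (P : List Int) (k j : Nat) (h : ReachP P k j) (m : Nat) :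
    (pfN P)^[j + m] k = (pfN P)^[j] k := by
  induction m with
  | zero => rfl
  | succ m ih =>
    rw [show j + (m + 1) = (j + m) + 1 from rfl, Function.iterate_succ_apply', ih]
    exact h

lemma reach_mono (P : List Int) (k j j' : Nat) (h : ReachP P k j) (hj : j ≤ j') :
    ReachP P k j' := by
  obtain ⟨m, rfl⟩ := Nat.exists_eq_add_of_le hj
  unfold ReachP
  rw [iterate_fix_stable P k j h m]
  exact h

lemma reach_shift (P : List Int) (k j : Nat) (h : ReachP P k (j + 1)) :
    ReachP P (pfN P k) j := by
  unfold ReachP at h ⊢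
  rwa [← Function.iterate_succ_apply]

lemma exists_reach (P : List Int) (hG : GoodP P) (k : Nat) (hk : k < P.length) :
    ∃ j, j < P.length ∧ ReachP P k j := by
  obtain ⟨rank, hrank⟩ := hG.2
  by_contra hcon
  push_neg at hcon
  set f : Nat → Nat := fun t => (pfN P)^[t] k with hf
  have hlt : ∀ t, f t < P.length := fun t => chain_lt P hG k hk t
  have hdec : ∀ j, j < P.length → rank (f (j + 1)) < rank (f j) := by
    intro j hj
    have hnf : pfN P (f j) ≠ f j := hcon j hj
    have : f (j + 1) = pfN P (f j) := Function.iterate_succ_apply' _ _ _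
    rw [this]
    exact hrank (f j) (hlt j) hnf
  have hstrict : ∀ j, j ≤ P.length → ∀ i, i < j → rank (f j) < rank (f i) := by
    intro j hj
    induction j with
    | zero => omega
    | succ j ih =>
      intro i hi
      have h1 : rank (f (j + 1)) < rank (f j) := hdec j (by omega)
      rcases Nat.lt_succ_iff_lt_or_eq.mp hi with h | h
      · exact lt_trans h1 (ih (by omega) i h)
      · subst h; exact h1
  have hinj : Set.InjOn f (Finset.range (P.length + 1)) := by
    intro i hi j hj hij
    simp only [Finset.coe_range, Set.mem_Iio] at hi hj
    by_contra hne
    rcases Nat.lt_or_ge i j with h | h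
    · have h2 := hstrict j (by omega) i h
      rw [hij] at h2; omega
    · have hji : j < i := by omega
      have h2 := hstrict i (by omega) j hji
      rw [hij] at h2; omega
  have hsub : Finset.image f (Finset.range (P.length + 1)) ⊆ Finset.range P.length := by
    intro x hx
    simp only [Finset.mem_image, Finset.mem_range] at hx ⊢
    obtain ⟨t, _, rfl⟩ := hx
    exact hlt t
  have h1 : (Finset.image f (Finset.range (P.length + 1))).card = P.length + 1 := by
    rw [Finset.card_image_of_injOn hinj, Finset.card_range]
  have h2 := Finset.card_le_card hsub
  rw [h1, Finset.card_range] at h2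
  omega

lemma rIter_fix (P : List Int) (k : Nat) (h : pfN P k = k) (fuel : Nat) :
    rIter P k fuel = k := by
  cases fuel <;> simp [rIter, h]

lemma rIter_succ (P : List Int) (k : Nat) (h : pfN P k ≠ k) (fuel : Nat) :
    rIter P k (fuel + 1) = rIter P (pfN P k) fuel := by
  simp [rIter, h]

lemma rIter_stable (P : List Int) (k j fuel : Nat) (h : ReachP P k j) (hf : j ≤ fuel) :
    rIter P k fuel = rIter P k j := by
  induction j generalizing k fuel with
  | zero => rw [rIter_fix P k h fuel, rIter_fix P k h 0]
  | succ j ih =>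
    by_cases hfix : pfN P k = k
    · rw [rIter_fix P k hfix, rIter_fix P k hfix]
    · obtain ⟨f, rfl⟩ : ∃ f, fuel = f + 1 := ⟨fuel - 1, by omega⟩
      rw [rIter_succ P k hfix, rIter_succ P k hfix]
      exact ih _ _ (reach_shift P k j h) (by omega)

lemma fix_of_reach (P : List Int) (k j : Nat) (h : ReachP P k j) :
    pfN P (rIter P k j) = rIter P k j := by
  induction j generalizing k with
  | zero => exact h
  | succ j ih =>
    by_cases hfix : pfN P k = k
    · rw [rIter_fix P k hfix]; exact hfix
    · rw [rIter_succ P k hfix]; exact ih _ (reach_shift P k j h)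

lemma root_fix (P : List Int) (hG : GoodP P) (k : Nat) (hk : k < P.length) :
    pfN P (rootP P k) = rootP P k := by
  obtain ⟨j, hj, hr⟩ := exists_reach P hG k hk
  unfold rootP
  rw [rIter_stable P k j P.length hr (by omega)]
  exact fix_of_reach P k j hr

lemma root_fix_self (P : List Int) (k : Nat) (h : pfN P k = k) : rootP P k = k :=
  rIter_fix P k h P.length

lemma rIter_lt (P : List Int) (hG : GoodP P) (k : Nat) (hk : k < P.length) (fuel : Nat) :
    rIter P k fuel < P.length := by
  induction fuel generalizing k with
  | zero => simpa [rIter]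
  | succ fuel ih =>
    by_cases hfix : pfN P k = k
    · rw [rIter_fix P k hfix]; exact hk
    · rw [rIter_succ P k hfix]; exact ih _ (pf_lt P hG k hk)

lemma root_lt (P : List Int) (hG : GoodP P) (k : Nat) (hk : k < P.length) :
    rootP P k < P.length := rIter_lt P hG k hk P.length

lemma root_cong (P : List Int) (hG : GoodP P) (k : Nat) (hk : k < P.length) :
    rootP P (pfN P k) = rootP P k := by
  by_cases hfix : pfN P k = k
  · rw [hfix]
  · obtain ⟨j, hj, hr⟩ := exists_reach P hG k hk
    obtain ⟨j', rfl⟩ : ∃ j', j = j' + 1 := by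
      refine ⟨j - 1, ?_⟩
      cases j with
      | zero => exact absurd hr hfix
      | succ j => rfl
    have hr' : ReachP P (pfN P k) j' := reach_shift P k j' hr
    unfold rootP
    rw [rIter_stable P k (j' + 1) P.length hr (by omega), rIter_succ P k hfix,
      rIter_stable P (pfN P k) j' P.length hr' (by omega)]

-- ---------- compression step ----------

lemma pf_set (P : List Int) (k : Nat) (hk : k < P.length) (v : Nat) (a : Nat) :
    pfN (P.set k ((v : Nat) : Int)) a = if a = k then v else pfN P a := by
  unfold pfN
  rw [List.getD_eq_getElem?_getD, List.getElem?_set]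
  by_cases h : a = k
  · subst h; simp [hk]
  · have h' : ¬ (k = a) := fun e => h e.symm
    simp [h, h', List.getD_eq_getElem?_getD]

lemma getD_set_int (P : List Int) (k : Nat) (hk : k < P.length) (v : Int) (a : Nat) :
    (P.set k v).getD a 0 = if a = k then v else P.getD a 0 := by
  rw [List.getD_eq_getElem?_getD, List.getElem?_set]
  by_cases h : a = k
  · subst h; simp [hk]
  · have h' : ¬ (k = a) := fun e => h e.symm
    simp [h, h', List.getD_eq_getElem?_getD]

lemma compGood (P : List Int) (hG : GoodP P) (k : Nat) (hk : k < P.length)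
    (hnf : pfN P k ≠ k) :
    GoodP (P.set k ((pfN P (pfN P k) : Nat) : Int)) := by
  obtain ⟨hent, rank, hrank⟩ := hG
  have hG' : GoodP P := ⟨hent, rank, hrank⟩
  constructor
  · intro a ha
    rw [List.length_set] at ha
    rw [List.length_set, getD_set_int P k hk _ a]
    by_cases h : a = k
    · rw [h, if_pos rfl]
      have h2 := pf_lt P hG' (pfN P k) (pf_lt P hG' k hk)
      omega
    · rw [if_neg h]
      exact hent a ha
  · refine ⟨rank, ?_⟩
    intro a ha hne
    rw [List.length_set] at ha
    rw [pf_set P k hk _ a] at hne ⊢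
    by_cases h : a = k
    · rw [h] at hne ⊢
      rw [if_pos rfl] at hne ⊢
      by_cases hf2 : pfN P (pfN P k) = pfN P k
      · rw [hf2]; exact hrank k hk hnf
      · exact lt_trans (hrank (pfN P k) (pf_lt P hG' k hk) hf2) (hrank k hk hnf)
    · rw [if_neg h] at hne ⊢
      exact hrank a ha hne

lemma compReach (P : List Int) (hG : GoodP P) (k : Nat) (hk : k < P.length)
    (hnf : pfN P k ≠ k) (a j : Nat) (ha : a < P.length) (hr : ReachP P a j) :
    ReachP (P.set k ((pfN P (pfN P k) : Nat) : Int)) a j := by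
  set Q := P.set k ((pfN P (pfN P k) : Nat) : Int) with hQ
  have sim : ∀ t a, a < P.length → ∃ t', t ≤ t' ∧ (pfN Q)^[t] a = (pfN P)^[t'] a := by
    intro t
    induction t with
    | zero => intro a _; exact ⟨0, le_refl _, rfl⟩
    | succ t ih =>
      intro a ha
      obtain ⟨t', ht, heq⟩ := ih a ha
      have hb : (pfN P)^[t'] a < P.length := chain_lt P hG a ha t'
      rw [Function.iterate_succ_apply', heq]
      by_cases hbk : (pfN P)^[t'] a = k
      · refine ⟨t' + 2, by omega, ?_⟩
        rw [show t' + 2 = (t' + 1) + 1 from rfl, Function.iterate_succ_apply',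
          Function.iterate_succ_apply', pf_set P k hk _ _, hbk]
        simp
      · refine ⟨t' + 1, by omega, ?_⟩
        rw [Function.iterate_succ_apply', pf_set P k hk _ _]
        simp [hbk]
  obtain ⟨j', hj, heq⟩ := sim j a ha
  have hfix : pfN P ((pfN P)^[j'] a) = (pfN P)^[j'] a := reach_mono P a j j' hr hj
  have hck : (pfN P)^[j'] a ≠ k := by
    intro e; rw [e] at hfix; exact hnf hfix
  unfold ReachP
  rw [heq, pf_set P k hk _ _, if_neg hck]
  exact hfix

lemma compRoot (P : List Int) (hG : GoodP P) (k : Nat) (hk : k < P.length)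
    (hnf : pfN P k ≠ k) (a : Nat) (ha : a < P.length) :
    rootP (P.set k ((pfN P (pfN P k) : Nat) : Int)) a = rootP P a := by
  set Q := P.set k ((pfN P (pfN P k) : Nat) : Int) with hQdef
  have hQG : GoodP Q := compGood P hG k hk hnf
  have hQlen : Q.length = P.length := List.length_set ..
  have key : ∀ j, ∀ a, a < P.length → ReachP P a j → rootP Q a = rootP P a := by
    intro j
    induction j using Nat.strong_induction_on with
    | _ j ih =>
      intro a ha hr
      by_cases hfa : pfN P a = a
      · have hak : a ≠ k := by intro e; rw [e] at hfa; exact hnf hfa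
        have hfq : pfN Q a = a := by rw [pf_set P k hk _ a, if_neg hak]; exact hfa
        rw [root_fix_self Q a hfq, root_fix_self P a hfa]
      · have hj1 : j ≠ 0 := by intro e; rw [e] at hr; exact hfa hr
        have hrr : ReachP P a ((j - 1) + 1) := by rwa [show (j - 1) + 1 = j by omega]
        have hr' : ReachP P (pfN P a) (j - 1) := reach_shift P a (j - 1) hrr
        have h1 : rootP Q (pfN Q a) = rootP Q a := root_cong Q hQG a (by omega)
        by_cases hak : a = k
        · have hQk : pfN Q a = pfN P (pfN P a) := by
            rw [pf_set P k hk _ a, if_pos hak, hak]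
          by_cases hf2 : pfN P (pfN P a) = pfN P a
          · have h2 := ih (j - 1) (by omega) (pfN P a) (pf_lt P hG a ha) hr'
            calc rootP Q a = rootP Q (pfN Q a) := h1.symm
              _ = rootP Q (pfN P a) := by rw [hQk, hf2]
              _ = rootP P (pfN P a) := h2
              _ = rootP P a := root_cong P hG a ha
          · have hj2 : j - 1 ≠ 0 := by
              intro e; rw [e] at hr'; exact hf2 hr'
            have hrr2 : ReachP P (pfN P a) ((j - 2) + 1) := by
              rwa [show (j - 2) + 1 = j - 1 by omega]
            have hr2 : ReachP P (pfN P (pfN P a)) (j - 2) := reach_shift P (pfN P a) (j - 2) hrr2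
            have h2 := ih (j - 2) (by omega) (pfN P (pfN P a))
              (pf_lt P hG _ (pf_lt P hG a ha)) hr2
            calc rootP Q a = rootP Q (pfN Q a) := h1.symm
              _ = rootP P (pfN P (pfN P a)) := by rw [hQk]; exact h2
              _ = rootP P (pfN P a) := root_cong P hG _ (pf_lt P hG a ha)
              _ = rootP P a := root_cong P hG a ha
        · have hQa : pfN Q a = pfN P a := by rw [pf_set P k hk _ a, if_neg hak]
          have h2 := ih (j - 1) (by omega) (pfN P a) (pf_lt P hG a ha) hr'
          calc rootP Q a = rootP Q (pfN Q a) := h1.symm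
            _ = rootP P (pfN P a) := by rw [hQa]; exact h2
            _ = rootP P a := root_cong P hG a ha
  obtain ⟨j, _, hr⟩ := exists_reach P hG a ha
  exact key j a ha hr

-- ---------- find ----------

lemma pvFind_fix (P : List Int) (hG : GoodP P) (k : Nat) (hk : k < P.length)
    (h : pfN P k = k) (fuel : Nat) : pvFind P (k : Int) fuel = (P, (k : Int)) := by
  cases fuel with
  | zero => rfl
  | succ fuel =>
    unfold pvFind
    have : PySem.List.pyGetD P (k : Int) 0 = (k : Int) := by
      rw [PySem.List.pyGetD_natCast, getD_eq_cast_pf P hG k hk, h]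
    simp [this]

lemma pvFind_succ (P : List Int) (x : Int) (fuel : Nat) :
    pvFind P x (fuel + 1) =
      if PySem.List.pyGetD P x 0 ≠ x then
        pvFind (PySem.List.pySetD P x
            (PySem.List.pyGetD P (PySem.List.pyGetD P x 0) 0))
          (PySem.List.pyGetD P (PySem.List.pyGetD P x 0) 0) fuel
      else (P, x) := rfl

lemma reach_two_shift (P : List Int) (k j : Nat) (hj : j ≠ 0) (hr : ReachP P k j) :
    ReachP P (pfN P (pfN P k)) (j - 1) := by
  have h2 : pfN P (pfN P k) = (pfN P)^[2] k := rfl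
  unfold ReachP
  rw [h2, ← Function.iterate_add_apply, show j - 1 + 2 = j + 1 by omega]
  have hs := iterate_fix_stable P k j hr 1
  rw [show j + 1 = j + 1 from rfl, hs]
  exact hr

lemma find_spec_nat (j : Nat) : ∀ (P : List Int) (k fuel : Nat), GoodP P → k < P.length →
    ReachP P k j → j ≤ fuel →
    (pvFind P (k : Int) fuel).2 = ((rootP P k : Nat) : Int) ∧
    GoodP (pvFind P (k : Int) fuel).1 ∧
    (pvFind P (k : Int) fuel).1.length = P.length ∧
    (∀ a, a < P.length → rootP (pvFind P (k : Int) fuel).1 a = rootP P a) := by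
  induction j using Nat.strong_induction_on with
  | _ j ih =>
    intro P k fuel hG hk hr hf
    by_cases hfix : pfN P k = k
    · rw [pvFind_fix P hG k hk hfix fuel]
      exact ⟨by rw [root_fix_self P k hfix], hG, rfl, fun a _ => rfl⟩
    · have hj1 : j ≠ 0 := by intro e; rw [e] at hr; exact hfix hr
      obtain ⟨f, rfl⟩ : ∃ f, fuel = f + 1 := ⟨fuel - 1, by omega⟩
      have hget1 : PySem.List.pyGetD P (k : Int) 0 = ((pfN P k : Nat) : Int) := by
        rw [PySem.List.pyGetD_natCast]; exact getD_eq_cast_pf P hG k hk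
      have hget2 : PySem.List.pyGetD P ((pfN P k : Nat) : Int) 0
          = ((pfN P (pfN P k) : Nat) : Int) := by
        rw [PySem.List.pyGetD_natCast]; exact getD_eq_cast_pf P hG _ (pf_lt P hG k hk)
      have hne : ((pfN P k : Nat) : Int) ≠ ((k : Nat) : Int) := by
        intro e; exact hfix (by exact_mod_cast e)
      have hstep : pvFind P ((k : Nat) : Int) (f + 1) =
          pvFind (P.set k ((pfN P (pfN P k) : Nat) : Int)) ((pfN P (pfN P k) : Nat) : Int) f := by
        rw [pvFind_succ, if_pos (by rw [hget1]; exact hne), hget1, hget2,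
          PySem.List.pySetD_natCast]
      set Q := P.set k ((pfN P (pfN P k) : Nat) : Int) with hQdef
      have hg2 : pfN P (pfN P k) < P.length := pf_lt P hG _ (pf_lt P hG k hk)
      have hQlen : Q.length = P.length := List.length_set ..
      have hQG : GoodP Q := compGood P hG k hk hfix
      have hrP : ReachP P (pfN P (pfN P k)) (j - 1) := reach_two_shift P k j hj1 hr
      have hrQ : ReachP Q (pfN P (pfN P k)) (j - 1) := compReach P hG k hk hfix _ _ hg2 hrP
      have hIH := ih (j - 1) (by omega) Q (pfN P (pfN P k)) f hQG (by omega) hrQ (by omega)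
      rw [hstep]
      obtain ⟨hv, hg, hl, hroots⟩ := hIH
      have hrootg : rootP Q (pfN P (pfN P k)) = rootP P k := by
        rw [compRoot P hG k hk hfix _ hg2, root_cong P hG _ (pf_lt P hG k hk),
          root_cong P hG k hk]
      refine ⟨by rw [hv, hrootg], hg, by rw [hl, hQlen], ?_⟩
      intro a ha
      rw [hroots a (by omega), compRoot P hG k hk hfix a ha]

lemma find_spec_int (P : List Int) (x : Int) (hG : GoodP P)
    (h1 : -(P.length : Int) ≤ x) (h2 : x < (P.length : Int)) :
    (pvFind P x (P.length + 1)).2 = ((rootP P (nrm P.length x) : Nat) : Int) ∧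
    GoodP (pvFind P x (P.length + 1)).1 ∧
    (pvFind P x (P.length + 1)).1.length = P.length ∧
    (∀ a, a < P.length → rootP (pvFind P x (P.length + 1)).1 a = rootP P a) := by
  set k := nrm P.length x with hkdef
  have hk : k < P.length := nrm_lt P.length x h1 h2
  obtain ⟨j, hj, hr⟩ := exists_reach P hG k hk
  by_cases hx : 0 ≤ x
  · have hxk : x = ((k : Nat) : Int) := by rw [hkdef]; unfold nrm; rw [if_pos hx]; omega
    rw [hxk]
    exact find_spec_nat j P k (P.length + 1) hG hk hr (by omega)
  · have hxneg : x < 0 := by omega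
    have hget1 : PySem.List.pyGetD P x 0 = ((pfN P k : Nat) : Int) := by
      rw [pyGetD_nrm P x 0 h1 h2, ← hkdef]
      exact getD_eq_cast_pf P hG k hk
    have htest : PySem.List.pyGetD P x 0 ≠ x := by rw [hget1]; intro e; omega
    by_cases hfix : pfN P k = k
    · have hget2 : PySem.List.pyGetD P (PySem.List.pyGetD P x 0) 0 = ((k : Nat) : Int) := by
        rw [hget1, hfix, PySem.List.pyGetD_natCast, getD_eq_cast_pf P hG k hk, hfix]
      have hsetid : PySem.List.pySetD P x ((k : Nat) : Int) = P := by
        rw [pySetD_nrm P x _ h1 h2, ← hkdef]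
        apply List.ext_getElem?
        intro i
        rw [List.getElem?_set]
        by_cases hik : k = i
        · rw [if_pos hik, if_pos (hik ▸ hk), ← hik]
          have hPk : P.getD k 0 = ((k : Nat) : Int) := by
            rw [getD_eq_cast_pf P hG k hk, hfix]
          rw [List.getD_eq_getElem?_getD] at hPk
          rw [List.getElem?_eq_getElem hk] at hPk ⊢
          simp at hPk
          rw [hPk]
        · rw [if_neg hik]
      have : pvFind P x (P.length + 1) = (P, ((k : Nat) : Int)) := by
        rw [pvFind_succ, if_pos htest, hget2, hsetid]
        exact pvFind_fix P hG k hk hfix P.length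
      rw [this]
      exact ⟨by rw [root_fix_self P k hfix], hG, rfl, fun a _ => rfl⟩
    · have : pvFind P x (P.length + 1) = pvFind P ((k : Nat) : Int) (P.length + 1) := by
        have hgk : PySem.List.pyGetD P ((k : Nat) : Int) 0 = PySem.List.pyGetD P x 0 := by
          rw [hget1, PySem.List.pyGetD_natCast, getD_eq_cast_pf P hG k hk]
        have htest' : PySem.List.pyGetD P ((k : Nat) : Int) 0 ≠ ((k : Nat) : Int) := by
          rw [hgk, hget1]
          intro e; exact hfix (by exact_mod_cast e)
        rw [pvFind_succ, pvFind_succ, if_pos htest, if_pos htest', hgk,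
          pySetD_nrm P x _ h1 h2, ← hkdef, PySem.List.pySetD_natCast]
      rw [this]
      exact find_spec_nat j P k (P.length + 1) hG hk hr (by omega)

-- ---------- union ----------

lemma unionGood (P : List Int) (hG : GoodP P) (rx ry : Nat) (hrx : rx < P.length)
    (hry : ry < P.length) (hfx : pfN P rx = rx) (hfy : pfN P ry = ry) (hne : rx ≠ ry) :
    GoodP (P.set rx ((ry : Nat) : Int)) := by
  obtain ⟨hent, rank, hrank⟩ := hG
  have hG' : GoodP P := ⟨hent, rank, hrank⟩
  constructor
  · intro a ha
    rw [List.length_set] at ha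
    rw [List.length_set, getD_set_int P rx hrx _ a]
    by_cases h : a = rx
    · rw [if_pos h]; omega
    · rw [if_neg h]; exact hent a ha
  · set M := (Finset.range P.length).sup rank with hM
    refine ⟨fun z => if rootP P z = ry then rank z else rank z + (M + 1), ?_⟩
    intro a ha hne'
    beta_reduce
    rw [List.length_set] at ha
    rw [pf_set P rx hrx ry a] at hne' ⊢
    by_cases h : a = rx
    · rw [h] at hne' ⊢
      rw [if_pos rfl] at hne' ⊢
      have hrootry : rootP P ry = ry := root_fix_self P ry hfy
      have hrootrx : rootP P rx = rx := root_fix_self P rx hfx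
      rw [if_pos hrootry, if_neg (by rw [hrootrx]; exact hne)]
      have hle : rank ry ≤ M := Finset.le_sup (Finset.mem_range.mpr hry)
      omega
    · rw [if_neg h] at hne' ⊢
      have hbase := hrank a ha hne'
      have hcong : rootP P (pfN P a) = rootP P a := root_cong P hG' a ha
      by_cases hc : rootP P a = ry
      · rw [if_pos hc, if_pos (by rw [hcong]; exact hc)]; omega
      · rw [if_neg hc, if_neg (by rw [hcong]; exact hc)]; omega

lemma unionRoot (P : List Int) (hG : GoodP P) (rx ry : Nat) (hrx : rx < P.length)
    (hry : ry < P.length) (hfx : pfN P rx = rx) (hfy : pfN P ry = ry) (hne : rx ≠ ry)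
    (z : Nat) (hz : z < P.length) :
    rootP (P.set rx ((ry : Nat) : Int)) z = if rootP P z = rx then ry else rootP P z := by
  set Q := P.set rx ((ry : Nat) : Int) with hQdef
  have hQG : GoodP Q := unionGood P hG rx ry hrx hry hfx hfy hne
  have hQlen : Q.length = P.length := List.length_set ..
  have hfyQ : pfN Q ry = ry := by
    rw [pf_set P rx hrx ry ry, if_neg (fun e => hne e.symm)]; exact hfy
  have key : ∀ j, ∀ a, a < P.length → ReachP P a j →
      rootP Q a = if rootP P a = rx then ry else rootP P a := by
    intro j
    induction j using Nat.strong_induction_on with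
    | _ j ih =>
      intro a ha hr
      by_cases hfa : pfN P a = a
      · have hroota : rootP P a = a := root_fix_self P a hfa
        by_cases hax : a = rx
        · rw [if_pos (by rw [hroota]; exact hax)]
          have hQa : pfN Q a = ry := by rw [pf_set P rx hrx ry a, if_pos hax]
          have hcong : rootP Q (pfN Q a) = rootP Q a := root_cong Q hQG a (by omega)
          rw [← hcong, hQa, root_fix_self Q ry hfyQ]
        · rw [if_neg (by rw [hroota]; exact hax)]
          have hQa : pfN Q a = a := by
            rw [pf_set P rx hrx ry a, if_neg hax]; exact hfa
          rw [root_fix_self Q a hQa, hroota]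
      · have hj1 : j ≠ 0 := by intro e; rw [e] at hr; exact hfa hr
        have hax : a ≠ rx := by intro e; rw [e] at hfa; exact hfa hfx
        have hQa : pfN Q a = pfN P a := by rw [pf_set P rx hrx ry a, if_neg hax]
        have hrr : ReachP P a ((j - 1) + 1) := by rwa [show (j - 1) + 1 = j by omega]
        have hr' : ReachP P (pfN P a) (j - 1) := reach_shift P a (j - 1) hrr
        have h2 := ih (j - 1) (by omega) (pfN P a) (pf_lt P hG a ha) hr'
        have hcongQ : rootP Q (pfN Q a) = rootP Q a := root_cong Q hQG a (by omega)
        have hcongP : rootP P (pfN P a) = rootP P a := root_cong P hG a ha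
        rw [← hcongQ, hQa, h2, hcongP]
  obtain ⟨j, _, hr⟩ := exists_reach P hG z hz
  exact key j z hz hr

lemma union_spec (P : List Int) (hG : GoodP P) (x y : Int)
    (hx1 : 0 ≤ x) (hx2 : x < (P.length : Int))
    (hy1 : -(P.length : Int) ≤ y) (hy2 : y < (P.length : Int)) :
    GoodP (pvUnion P x y) ∧ (pvUnion P x y).length = P.length ∧
    (∀ z, z < P.length → rootP (pvUnion P x y) z =
      if rootP P z = rootP P (nrm P.length x) then rootP P (nrm P.length y)
      else rootP P z) := by
  obtain ⟨hv1, hG1, hl1, hroots1⟩ := find_spec_int P x hG (by omega) hx2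
  set P1 := (pvFind P x (P.length + 1)).1 with hP1
  set rx := rootP P (nrm P.length x) with hrx
  have hnx : nrm P.length x < P.length := nrm_lt P.length x (by omega) hx2
  have hny : nrm P.length y < P.length := nrm_lt P.length y hy1 hy2
  obtain ⟨hv2, hG2, hl2, hroots2⟩ := find_spec_int P1 y hG1 (by rw [hl1]; exact hy1)
    (by rw [hl1]; exact hy2)
  set P2 := (pvFind P1 y (P1.length + 1)).1 with hP2
  have hl2' : P2.length = P.length := by rw [hl2, hl1]
  have hnrmy1 : nrm P1.length y = nrm P.length y := by rw [hl1]
  set ry := rootP P (nrm P.length y) with hry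
  have hry1 : rootP P1 (nrm P1.length y) = ry := by
    rw [hnrmy1, hroots1 _ hny]
  have hroots2' : ∀ a, a < P.length → rootP P2 a = rootP P a := by
    intro a ha
    rw [hroots2 a (by omega), hroots1 a ha]
  have hrxlt : rx < P.length := root_lt P hG _ hnx
  have hrylt : ry < P.length := root_lt P hG _ hny
  have hufold : pvUnion P x y =
      (if (pvFind P x (P.length + 1)).2 ≠ (pvFind P1 y (P1.length + 1)).2 then
        PySem.List.pySetD P2 (pvFind P x (P.length + 1)).2 (pvFind P1 y (P1.length + 1)).2
      else P2) := rfl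
  rw [hufold, hv1, hv2, hry1]
  by_cases hrxy : rx = ry
  · rw [if_neg (by rw [hrxy]; simp)]
    refine ⟨hG2, hl2', ?_⟩
    intro z hz
    rw [hroots2' z hz]
    by_cases hc : rootP P z = rx
    · rw [if_pos hc, hc, hrxy]
    · rw [if_neg hc]
  · have hcast : ((rx : Nat) : Int) ≠ ((ry : Nat) : Int) := by
      intro e; exact hrxy (by exact_mod_cast e)
    rw [if_pos hcast, PySem.List.pySetD_natCast]
    have hfx2 : pfN P2 rx = rx := by
      have : rx = rootP P2 (nrm P.length x) := by rw [hroots2' _ hnx]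
      rw [this]
      exact root_fix P2 hG2 _ (by omega)
    have hfy2 : pfN P2 ry = ry := by
      have : ry = rootP P2 (nrm P.length y) := by rw [hroots2' _ hny]
      rw [this]
      exact root_fix P2 hG2 _ (by omega)
    refine ⟨unionGood P2 hG2 rx ry (by omega) (by omega) hfx2 hfy2 hrxy, ?_, ?_⟩
    · rw [List.length_set]; exact hl2'
    · intro z hz
      rw [unionRoot P2 hG2 rx ry (by omega) (by omega) hfx2 hfy2 hrxy z (by omega),
        hroots2' z hz]

-- ---------- the A/B invariant ----------

def InvAB (n : Int) (P C : List Int) : Prop :=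
  GoodP P ∧ P.length = n.toNat ∧ C.length = n.toNat ∧
  ∀ a b, a < n.toNat → b < n.toNat →
    (rootP P a = rootP P b ↔ C.getD a 0 = C.getD b 0)

lemma getD_map_lt (C : List Int) (φ : Int → Int) (u : Nat) (hu : u < C.length) :
    (C.map φ).getD u 0 = φ (C.getD u 0) := by
  rw [List.getD_eq_getElem?_getD, List.getElem?_map, List.getD_eq_getElem?_getD,
    List.getElem?_eq_getElem hu]
  rfl

lemma edgeInv (n : Int) (P C : List Int) (hI : InvAB n P C) (i y : Int)
    (hi1 : 0 ≤ i) (hi2 : i < n) (hy1 : -n ≤ y) (hy2 : y < n) :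
    InvAB n (pvUnion P i y)
      (let a := PySem.List.pyGetD C i 0
       let b := PySem.List.pyGetD C y 0
       if a ≠ b then pvRelabel C a b else C) := by
  obtain ⟨hG, hPl, hCl, hrel⟩ := hI
  have hn0 : 0 < n := by omega
  have hPLen : (P.length : Int) = n := by rw [hPl]; omega
  have hCLen : (C.length : Int) = n := by rw [hCl]; omega
  have hCP : C.length = P.length := by omega
  obtain ⟨hUG, hUl, hUroots⟩ := union_spec P hG i y hi1 (by omega) (by omega) (by omega)
  set ki := nrm P.length i with hkidef
  set ky := nrm P.length y with hkydef
  have hki : ki < n.toNat := by have := nrm_lt P.length i (by omega) (by omega); omega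
  have hky : ky < n.toNat := by have := nrm_lt P.length y (by omega) (by omega); omega
  have hga : PySem.List.pyGetD C i 0 = C.getD ki 0 := by
    rw [pyGetD_nrm C i 0 (by omega) (by omega), hCP]
  have hgb : PySem.List.pyGetD C y 0 = C.getD ky 0 := by
    rw [pyGetD_nrm C y 0 (by omega) (by omega), hCP]
  show InvAB n (pvUnion P i y)
    (if PySem.List.pyGetD C i 0 ≠ PySem.List.pyGetD C y 0 then
      pvRelabel C (PySem.List.pyGetD C i 0) (PySem.List.pyGetD C y 0) else C)
  rw [hga, hgb]
  have hiff : rootP P ki = rootP P ky ↔ C.getD ki 0 = C.getD ky 0 :=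
    hrel ki ky hki hky
  by_cases heq : C.getD ki 0 = C.getD ky 0
  · rw [if_neg (by simpa using heq)]
    have hrxy : rootP P ki = rootP P ky := hiff.mpr heq
    refine ⟨hUG, by omega, hCl, ?_⟩
    have hUid : ∀ z, z < n.toNat → rootP (pvUnion P i y) z = rootP P z := by
      intro z hz
      rw [hUroots z (by omega)]
      by_cases hc : rootP P z = rootP P ki
      · rw [if_pos hc, hc, hrxy]
      · rw [if_neg hc]
    intro u v hu hv
    rw [hUid u hu, hUid v hv]
    exact hrel u v hu hv
  · rw [if_pos (by simpa using heq)]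
    have hrxy : rootP P ki ≠ rootP P ky := fun e => heq (hiff.mp e)
    refine ⟨hUG, by omega, by simp [pvRelabel, hCl], ?_⟩
    intro u v hu hv
    have hu' : u < C.length := by omega
    have hv' : v < C.length := by omega
    rw [hUroots u (by omega), hUroots v (by omega)]
    unfold pvRelabel
    rw [getD_map_lt C _ u hu', getD_map_lt C _ v hv']
    have hua : rootP P u = rootP P ki ↔ C.getD u 0 = C.getD ki 0 := hrel u ki hu hki
    have hub : rootP P u = rootP P ky ↔ C.getD u 0 = C.getD ky 0 := hrel u ky hu hky
    have hva : rootP P v = rootP P ki ↔ C.getD v 0 = C.getD ki 0 := hrel v ki hv hki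
    have hvb : rootP P v = rootP P ky ↔ C.getD v 0 = C.getD ky 0 := hrel v ky hv hky
    have huv : rootP P u = rootP P v ↔ C.getD u 0 = C.getD v 0 := hrel u v hu hv
    by_cases h1 : rootP P u = rootP P ki <;> by_cases h2 : rootP P v = rootP P ki
    · rw [if_pos h1, if_pos h2, if_pos (hua.mp h1), if_pos (hva.mp h2)]
      simp
    · rw [if_pos h1, if_neg h2, if_pos (hua.mp h1), if_neg (fun e => h2 (hva.mpr e))]
      constructor
      · intro e; exact (hvb.mp e.symm).symm
      · intro e; exact (hvb.mpr e.symm).symm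
    · rw [if_neg h1, if_pos h2, if_neg (fun e => h1 (hua.mpr e)), if_pos (hva.mp h2)]
      constructor
      · intro e; exact hub.mp e
      · intro e; exact hub.mpr e
    · rw [if_neg h1, if_neg h2, if_neg (fun e => h1 (hua.mpr e)),
        if_neg (fun e => h2 (hva.mpr e))]
      exact huv

lemma roundInv (n : Int) (perm : List Int) (hlen : n ≤ (perm.length : Int))
    (hperm : ∀ p ∈ perm.take n.toNat, -n ≤ p ∧ p < n)
    (P C : List Int) (hI : InvAB n P C) :
    InvAB n (pvUnionRound n P perm) (pvMergeRound n C perm) := by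
  unfold pvUnionRound pvMergeRound
  have hsub : ∀ i ∈ PySem.List.pyRange 0 n 1, 0 ≤ i ∧ i < n := by
    intro i hi
    exact PySem.List.mem_pyRange_one.mp hi
  revert P C
  generalize PySem.List.pyRange 0 n 1 = L at hsub
  induction L with
  | nil => intro P C hI; exact hI
  | cons i L ih =>
    intro P C hI
    obtain ⟨hi1, hi2⟩ := hsub i List.mem_cons_self
    have hy : -n ≤ PySem.List.pyGetD perm i 0 ∧ PySem.List.pyGetD perm i 0 < n := by
      have hilen : i.toNat < perm.length := by omega
      have hg : PySem.List.pyGetD perm i 0 = perm[i.toNat] := by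
        rw [PySem.List.pyGetD_eq_getElem perm 0 hi1 (by omega)]
      have hmem : perm[i.toNat] ∈ perm.take n.toNat := by
        have ht : i.toNat < (perm.take n.toNat).length := by
          rw [List.length_take]; omega
        have := List.getElem_take (xs := perm) (j := n.toNat) (i := i.toNat) (h := ht)
        rw [← this]
        exact List.getElem_mem ht
      rw [hg]
      exact hperm _ hmem
    simp only [List.foldl_cons]
    exact ih (fun j hj => hsub j (List.mem_cons_of_mem i hj)) _ _
      (edgeInv n P C hI i (PySem.List.pyGetD perm i 0) hi1 hi2 hy.1 hy.2)

lemma groupInv (n : Int) (group : List (List Int)) (hpre : Pre_orbits group n)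
    (P C : List Int) (hI : InvAB n P C) :
    InvAB n (group.foldl (pvUnionRound n) P) (group.foldl (pvMergeRound n) C) := by
  induction group generalizing P C with
  | nil => exact hI
  | cons perm group ih =>
    simp only [List.foldl_cons]
    obtain ⟨hlen, hperm⟩ := hpre perm List.mem_cons_self
    exact ih (fun q hq => hpre q (List.mem_cons_of_mem perm hq)) _ _
      (roundInv n perm hlen hperm P C hI)

lemma getD_pyRange (n : Int) (k : Nat) (hk : k < (PySem.List.pyRange 0 n 1).length) :
    (PySem.List.pyRange 0 n 1).getD k 0 = (k : Int) := by
  rw [List.getD_eq_getElem?_getD, List.getElem?_eq_getElem hk,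
    PySem.List.getElem_pyRange_one 0 n k hk]
  simp

lemma baseInv (n : Int) : InvAB n (PySem.List.pyRange 0 n 1) (PySem.List.pyRange 0 n 1) := by
  have hlen : (PySem.List.pyRange 0 n 1).length = n.toNat := by
    rw [PySem.List.length_pyRange_one]; congr 1; omega
  have hfix : ∀ k, k < (PySem.List.pyRange 0 n 1).length →
      pfN (PySem.List.pyRange 0 n 1) k = k := by
    intro k hk
    unfold pfN
    rw [getD_pyRange n k hk]
    omega
  refine ⟨⟨?_, id, ?_⟩, hlen, hlen, ?_⟩
  · intro k hk
    rw [getD_pyRange n k hk]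
    omega
  · intro k hk hne
    exact absurd (hfix k hk) hne
  · intro a b ha hb
    rw [root_fix_self _ a (hfix a (by omega)), root_fix_self _ b (hfix b (by omega)),
      getD_pyRange n a (by omega), getD_pyRange n b (by omega)]
    omega

-- ---------- grouping ----------

/-- first-seen class representatives of `X` under key `κ` -/
def leadersK (κ : Int → Int) (X : List Int) : List Int :=
  X.foldl (fun acc x => if (acc.map κ).contains (κ x) then acc else acc ++ [x]) []

lemma leadersK_aux_subset (κ : Int → Int) :
    ∀ (X acc : List Int), ∀ ℓ ∈ X.foldl
      (fun acc x => if (acc.map κ).contains (κ x) then acc else acc ++ [x]) acc,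
      ℓ ∈ acc ∨ ℓ ∈ X := by
  intro X
  induction X with
  | nil => intro acc ℓ hl; exact Or.inl hl
  | cons x X ih =>
    intro acc ℓ hl
    rw [List.foldl_cons] at hl
    rcases ih _ ℓ hl with h | h
    · by_cases hc : ((acc.map κ).contains (κ x)) = true
      · rw [if_pos hc] at h
        exact Or.inl h
      · rw [if_neg hc] at h
        rcases List.mem_append.mp h with h' | h'
        · exact Or.inl h'
        · simp at h'
          exact Or.inr (by simp [h'])
    · exact Or.inr (List.mem_cons_of_mem x h)

lemma leadersK_subset (κ : Int → Int) (X : List Int) : ∀ ℓ ∈ leadersK κ X, ℓ ∈ X := by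
  intro ℓ hl
  rcases leadersK_aux_subset κ X [] ℓ hl with h | h
  · simp at h
  · exact h

lemma dedup_map_eq_leaders (κ : Int → Int) (X : List Int) :
    PySem.List.dedup (X.map κ) = (leadersK κ X).map κ := by
  have aux : ∀ (X acc : List Int),
      X.foldl (fun s x => PySem.Set.add s (κ x)) (acc.map κ) =
        (X.foldl (fun acc x => if (acc.map κ).contains (κ x) then acc else acc ++ [x])
          acc).map κ := by
    intro X
    induction X with
    | nil => intro acc; rfl
    | cons x X ih =>
      intro acc
      rw [List.foldl_cons, List.foldl_cons]
      have hadd : PySem.Set.add (acc.map κ) (κ x) =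
          (if (acc.map κ).contains (κ x) then acc else acc ++ [x]).map κ := by
        unfold PySem.Set.add PySem.Set.contains
        by_cases hc : ((acc.map κ).contains (κ x)) = true
        · rw [if_pos hc, if_pos hc]
        · rw [if_neg hc, if_neg hc, List.map_append]
          rfl
      rw [hadd]
      exact ih _
  have h0 : PySem.List.dedup (X.map κ) =
      X.foldl (fun s x => PySem.Set.add s (κ x)) (([] : List Int).map κ) := by
    unfold PySem.List.dedup PySem.Set.ofList
    rw [List.foldl_map]
    rfl
  rw [h0, aux X []]
  rfl

lemma leadersK_congr (κ1 κ2 : Int → Int) (X : List Int)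
    (H : ∀ a ∈ X, ∀ b ∈ X, κ1 a = κ1 b ↔ κ2 a = κ2 b) :
    leadersK κ1 X = leadersK κ2 X := by
  have aux : ∀ (Y acc : List Int), (∀ x ∈ Y, x ∈ X) → (∀ ℓ ∈ acc, ℓ ∈ X) →
      Y.foldl (fun acc x => if (acc.map κ1).contains (κ1 x) then acc else acc ++ [x]) acc =
      Y.foldl (fun acc x => if (acc.map κ2).contains (κ2 x) then acc else acc ++ [x]) acc := by
    intro Y
    induction Y with
    | nil => intro acc _ _; rfl
    | cons x Y ih =>
      intro acc hY hacc
      have hx : x ∈ X := hY x List.mem_cons_self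
      have hcond : ((acc.map κ1).contains (κ1 x)) = ((acc.map κ2).contains (κ2 x)) := by
        by_cases hc : ((acc.map κ1).contains (κ1 x)) = true
        · obtain ⟨c, hcmem, hceq⟩ := List.exists_of_mem_map
            ((List.contains_iff_mem).mp hc)
          have : κ2 c = κ2 x := (H c (hacc c hcmem) x hx).mp hceq
          have h2 : ((acc.map κ2).contains (κ2 x)) = true :=
            (List.contains_iff_mem).mpr (this ▸ List.mem_map_of_mem hcmem)
          rw [hc, h2]
        · have h2 : ¬ ((acc.map κ2).contains (κ2 x)) = true := by
            intro h2
            obtain ⟨c, hcmem, hceq⟩ := List.exists_of_mem_map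
              ((List.contains_iff_mem).mp h2)
            have : κ1 c = κ1 x := (H c (hacc c hcmem) x hx).mpr hceq
            exact hc ((List.contains_iff_mem).mpr (this ▸ List.mem_map_of_mem hcmem))
          rw [Bool.eq_false_iff.mpr hc, Bool.eq_false_iff.mpr h2]
      rw [List.foldl_cons, List.foldl_cons, hcond]
      by_cases hc : ((acc.map κ2).contains (κ2 x)) = true
      · rw [if_pos hc]
        exact ih acc (fun z hz => hY z (List.mem_cons_of_mem x hz)) hacc
      · rw [if_neg hc]
        refine ih (acc ++ [x]) (fun z hz => hY z (List.mem_cons_of_mem x hz)) ?_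
        intro ℓ hl
        rcases List.mem_append.mp hl with h | h
        · exact hacc ℓ h
        · simp at h
          rw [h]
          exact hx
  exact aux X [] (fun _ h => h) (fun _ h => by simp at h)

lemma appendfold_getD (κ : Int → Int) (X : List Int) (c : Int) :
    (X.foldl (fun d i => d.insert (κ i) (d.getD (κ i) [] ++ [i])) PySem.Dict.empty).getD c []
      = X.filter (fun i => κ i == c) := by
  induction X using List.reverseRecOn with
  | nil => rfl
  | append_singleton X a ih =>
    rw [List.foldl_append, List.foldl_cons, List.foldl_nil, List.filter_append,
      PySem.Dict.getD_insert]
    by_cases hc : c = κ a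
    · subst hc
      rw [if_pos rfl, ih]
      simp
    · rw [if_neg hc, ih]
      have : (κ a == c) = false := by
        simp only [beq_eq_false_iff_ne, ne_eq]
        exact fun e => hc e.symm
      simp [this]

lemma group_fold_values (κ : Int → Int) (X : List Int) :
    (X.foldl (fun d i => d.insert (κ i) (d.getD (κ i) [] ++ [i])) PySem.Dict.empty).values =
      (leadersK κ X).map (fun ℓ => X.filter (fun i => κ i == κ ℓ)) := by
  set d := X.foldl (fun d i => d.insert (κ i) (d.getD (κ i) [] ++ [i])) PySem.Dict.empty
    with hd
  have hkeys : d.keys = (leadersK κ X).map κ := by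
    rw [hd, PySem.Dict.keys_foldl_insert_key X κ (fun d i => d.getD (κ i) [] ++ [i])
      PySem.Dict.empty]
    have h1 : PySem.Set.update (PySem.Dict.empty : PySem.Dict Int (List Int)).keys (X.map κ)
        = PySem.List.dedup (X.map κ) := rfl
    rw [h1, dedup_map_eq_leaders]
  have hnodup : d.keys.Nodup := by
    rw [hd]
    exact PySem.Dict.nodup_keys_foldl_insert_key X κ _ PySem.Dict.empty (by simp)
  rw [PySem.Dict.values_eq_map_keys d hnodup [], hkeys, List.map_map]
  apply List.map_congr_left
  intro ℓ _
  simp only [Function.comp_apply]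
  rw [hd, appendfold_getD]

lemma setfold_eq_appendfold (κ : Int → Int) (X : List Int) (hX : X.Nodup) :
    X.foldl (fun d i => d.insert (κ i) (PySem.Set.add (d.getD (κ i) PySem.Set.empty) i))
        PySem.Dict.empty =
      X.foldl (fun d i => d.insert (κ i) (d.getD (κ i) [] ++ [i])) PySem.Dict.empty := by
  induction X using List.reverseRecOn with
  | nil => rfl
  | append_singleton X a ih =>
    have hXn : X.Nodup := (List.nodup_append.mp hX).1
    have haX : a ∉ X := by
      have := (List.nodup_append.mp hX).2.2
      intro hmem
      exact this a hmem a (List.mem_singleton.mpr rfl) rfl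
    rw [List.foldl_append, List.foldl_cons, List.foldl_nil,
      List.foldl_append, List.foldl_cons, List.foldl_nil, ih hXn]
    congr 1
    have hempty : (PySem.Set.empty : PySem.Set Int) = ([] : List Int) := rfl
    rw [hempty, appendfold_getD]
    unfold PySem.Set.add PySem.Set.contains
    have hnc : ((X.filter (fun i => κ i == κ a)).contains a) = false := by
      apply Bool.eq_false_iff.mpr
      intro hc
      exact haX (List.mem_of_mem_filter (List.contains_iff_mem.mp hc))
    rw [hnc]
    simp

lemma ofList_eq_self (l : List Int) (h : l.Nodup) : PySem.Set.ofList l = l := by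
  induction l using List.reverseRecOn with
  | nil => rfl
  | append_singleton l a ih =>
    have hln : l.Nodup := (List.nodup_append.mp h).1
    have hal : a ∉ l := by
      have := (List.nodup_append.mp h).2.2
      intro hmem
      exact this a hmem a (List.mem_singleton.mpr rfl) rfl
    have h1 : PySem.Set.ofList (l ++ [a]) = PySem.Set.add (PySem.Set.ofList l) a := by
      unfold PySem.Set.ofList
      rw [List.foldl_append, List.foldl_cons, List.foldl_nil]
    rw [h1, ih hln]
    unfold PySem.Set.add PySem.Set.contains
    have hnc : (l.contains a) = false := by
      apply Bool.eq_false_iff.mpr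
      intro hc
      exact hal (List.contains_iff_mem.mp hc)
    rw [hnc]
    simp

lemma setfold_key_congr (X : List Int) (κ1 κ2 : Int → Int)
    (H : ∀ i ∈ X, κ1 i = κ2 i) :
    ∀ d : PySem.Dict Int (PySem.Set Int),
      X.foldl (fun d i => d.insert (κ1 i) (PySem.Set.add (d.getD (κ1 i) PySem.Set.empty) i)) d
        = X.foldl (fun d i =>
            d.insert (κ2 i) (PySem.Set.add (d.getD (κ2 i) PySem.Set.empty) i)) d := by
  induction X with
  | nil => intro d; rfl
  | cons x X ih =>
    intro d
    rw [List.foldl_cons, List.foldl_cons, H x List.mem_cons_self]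
    exact ih (fun i hi => H i (List.mem_cons_of_mem x hi)) _

lemma collect_eq (n : Int) (P : List Int) (hG : GoodP P) (hlen : P.length = n.toNat) :
    (pvCollect n (P, PySem.Dict.empty)).2 =
      (PySem.List.pyRange 0 n 1).foldl
        (fun d i => d.insert ((rootP P i.toNat : Nat) : Int)
          (PySem.Set.add (d.getD ((rootP P i.toNat : Nat) : Int) PySem.Set.empty) i))
        PySem.Dict.empty := by
  have aux : ∀ (X : List Int), (∀ i ∈ X, 0 ≤ i ∧ i < n) →
      ∀ (P : List Int) (d : PySem.Dict Int (PySem.Set Int)), GoodP P → P.length = n.toNat →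
      (X.foldl (fun st i =>
          let fr := pvFind st.1 i (st.1.length + 1)
          (fr.1, st.2.insert fr.2 (PySem.Set.add (st.2.getD fr.2 PySem.Set.empty) i)))
        ((P, d) : List Int × PySem.Dict Int (PySem.Set Int))).2 =
      X.foldl (fun d i => d.insert ((rootP P i.toNat : Nat) : Int)
          (PySem.Set.add (d.getD ((rootP P i.toNat : Nat) : Int) PySem.Set.empty) i)) d := by
    intro X
    induction X with
    | nil => intro _ P d _ _; rfl
    | cons x X ih =>
      intro hX P d hG hlen
      obtain ⟨hx1, hx2⟩ := hX x List.mem_cons_self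
      have hxl : x < (P.length : Int) := by omega
      have hxn : -(P.length : Int) ≤ x := by omega
      obtain ⟨hv, hPG', hPl', hroots'⟩ := find_spec_int P x hG hxn hxl
      have hnrmx : nrm P.length x = x.toNat := by unfold nrm; rw [if_pos hx1]
      rw [List.foldl_cons, List.foldl_cons]
      simp only []
      rw [hv, hnrmx]
      rw [ih (fun i hi => hX i (List.mem_cons_of_mem x hi)) _ _ hPG' (by omega)]
      apply setfold_key_congr
      intro i hi
      obtain ⟨hi1, hi2⟩ := hX i (List.mem_cons_of_mem x hi)
      have : i.toNat < P.length := by omega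
      rw [hroots' i.toNat this]
  unfold pvCollect
  exact aux _ (fun i hi => PySem.List.mem_pyRange_one.mp hi) P PySem.Dict.empty hG hlen

-- ===== VERDICT (by name: the statement is the Claim_ definition above) =====
theorem orbits_spec : Claim_equal_orbits := by
  intro group n _ hpre
  unfold Spec_orbits orbits orbits_alt
  simp only []
  set X := PySem.List.pyRange 0 n 1 with hX
  obtain ⟨hG, hPl, hCl, hrel⟩ := groupInv n group hpre _ _ (baseInv n)
  set P1 := group.foldl (pvUnionRound n) X with hP1
  set C := group.foldl (pvMergeRound n) X with hC
  set κA : Int → Int := fun i => ((rootP P1 i.toNat : Nat) : Int) with hκA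
  set κB : Int → Int := fun i => PySem.List.pyGetD C i 0 with hκB
  have hXmem : ∀ i ∈ X, 0 ≤ i ∧ i < n := fun i hi => PySem.List.mem_pyRange_one.mp hi
  have hXnd : X.Nodup := PySem.List.nodup_pyRange_one 0 n
  have hκBeq : ∀ i ∈ X, κB i = C.getD i.toNat 0 := by
    intro i hi
    obtain ⟨h1, h2⟩ := hXmem i hi
    rw [hκB]
    simp only []
    rw [pyGetD_nrm C i 0 (by omega) (by omega)]
    congr 1
    unfold nrm
    rw [if_pos h1]
  have H : ∀ a ∈ X, ∀ b ∈ X, κA a = κA b ↔ κB a = κB b := by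
    intro a ha b hb
    obtain ⟨ha1, ha2⟩ := hXmem a ha
    obtain ⟨hb1, hb2⟩ := hXmem b hb
    rw [hκBeq a ha, hκBeq b hb, hκA]
    simp only [Nat.cast_inj]
    exact hrel a.toNat b.toNat (by omega) (by omega)
  have hA : (pvCollect n (P1, PySem.Dict.empty)).2.values =
      (leadersK κA X).map (fun ℓ => X.filter (fun i => κA i == κA ℓ)) := by
    rw [collect_eq n P1 hG hPl, ← hX]
    have hsf := setfold_eq_appendfold κA X hXnd
    rw [hκA] at hsf ⊢
    rw [hsf]
    exact group_fold_values _ X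
  have hB : (X.foldl (fun d i =>
        d.insert (PySem.List.pyGetD C i 0)
          (d.getD (PySem.List.pyGetD C i 0) [] ++ [i])) PySem.Dict.empty).values.map
        PySem.Set.ofList =
      (leadersK κB X).map (fun ℓ => X.filter (fun i => κB i == κB ℓ)) := by
    have h1 := group_fold_values κB X
    rw [hκB] at h1
    rw [h1, List.map_map]
    apply List.map_congr_left
    intro ℓ _
    simp only [Function.comp_apply]
    rw [hκB]
    exact ofList_eq_self _ (hXnd.filter _)
  rw [hA, hB, leadersK_congr κA κB X H]
  apply List.map_congr_left
  intro ℓ hℓ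
  have hℓX : ℓ ∈ X := leadersK_subset κB X ℓ hℓ
  apply List.filter_congr
  intro i hi
  by_cases h : κA i = κA ℓ
  · rw [h, ((H i hi ℓ hℓX).mp h)]
    simp
  · have h2 : κB i ≠ κB ℓ := fun e => h ((H i hi ℓ hℓX).mpr e)
    simp [h, h2]
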